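-- pv_equiv track=rewrite | github.com/JuanLozanoFrias/mi_aplicacion_python | logic/legend_jd/folder_loader.py | _split_equipos_by_row
-- ===== SOURCE A (Python) =====
-- from typing import Dict, List, Tuple
--
-- def _split_equipos_by_row(rows: List[dict]) -> Dict[str, List[dict]]:
--     items = [r for r in rows if isinstance(r, dict) and isinstance(r.get("row"), int)]
--     if not items:
--         return {"BT": [], "MT": []}
--     items = sorted(items, key=lambda x: x.get("row", 0))
--     blocks: List[List[dict]] = []
--     current: List[dict] = []
--     prev = None
--     for item in items:
--         row = item.get("row", 0)
--         if prev is not None and row - prev > 1: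
--             blocks.append(current)
--             current = []
--         current.append(item)
--         prev = row
--     if current:
--         blocks.append(current)
--     if len(blocks) == 1:
--         return {"BT": blocks[0], "MT": []}
--     return {"BT": blocks[0], "MT": blocks[1]}
-- ===== SOURCE B (Python) =====
-- from typing import Dict, List, Tuple
--
-- def _first_block(head: dict, tail: List[dict]):
--     # first contiguous block (consecutive sorted rows differ by <= 1) and the remainder
--     if tail and tail[0].get("row", 0) - head.get("row", 0) <= 1:
--         block, rest = _first_block(tail[0], tail[1:])
--         return [head] + block, rest
--     return [head], tail
--
-- def _split_equipos_by_row(rows: List[dict]) -> Dict[str, List[dict]]: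
--     items = [r for r in rows if isinstance(r, dict) and isinstance(r.get("row"), int)]
--     if not items:
--         return {"BT": [], "MT": []}
--     items = sorted(items, key=lambda x: x.get("row", 0))
--     bt, rest = _first_block(items[0], items[1:])
--     mt = _first_block(rest[0], rest[1:])[0] if rest else []
--     return {"BT": bt, "MT": mt}
-- ===== Notes on version B (the rewrite author's own statement) =====
-- stated objective: alternative
-- what changed: Replaced A's single stateful loop (blocks/current/prev accumulators building a list of all blocks, then flushed and indexed) with a recursive helper that peels the first contiguous block off the sorted list and is applied at most twice (once for BT, once on the remainder for MT), never materialising later blocks.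
import Mathlib
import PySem

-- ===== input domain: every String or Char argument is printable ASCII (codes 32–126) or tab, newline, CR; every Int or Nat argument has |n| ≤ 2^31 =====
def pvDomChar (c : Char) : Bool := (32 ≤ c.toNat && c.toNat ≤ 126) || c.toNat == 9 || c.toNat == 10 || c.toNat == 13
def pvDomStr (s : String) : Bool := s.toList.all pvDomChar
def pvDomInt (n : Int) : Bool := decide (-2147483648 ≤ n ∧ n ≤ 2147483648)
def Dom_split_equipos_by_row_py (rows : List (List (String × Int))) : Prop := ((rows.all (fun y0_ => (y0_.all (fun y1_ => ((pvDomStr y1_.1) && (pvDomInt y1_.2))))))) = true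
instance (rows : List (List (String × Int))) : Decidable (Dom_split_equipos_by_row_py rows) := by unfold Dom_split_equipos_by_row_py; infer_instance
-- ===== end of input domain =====

-- B replaces A's stateful blocks/current/prev loop by a recursive 'first contiguous block' peel applied at most twice (alternative decomposition).

-- ===== PORT A =====
-- r.get("row") on the dict r (association list, first match)
def rowGetA (r : List (String × Int)) : Option Int := (r.find? (fun p => p.1 == "row")).map (·.2)

def split_equipos_by_row_py (rows : List (List (String × Int))) : List (String × List (List (String × Int))) :=
  let items := rows.filter (fun r => (rowGetA r).isSome)
  if items = [] then [("BT", []), ("MT", [])]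
  else
    let items := PySem.List.sorted items (fun x => (rowGetA x).getD 0) false
    -- loop state: (blocks, current, prev)
    let st := items.foldl (fun (st : List (List (List (String × Int))) × List (List (String × Int)) × Option Int) item =>
      let row := (rowGetA item).getD 0
      let st1 := match st.2.2 with
        | some p => if row - p > 1 then (st.1 ++ [st.2.1], ([] : List (List (String × Int)))) else (st.1, st.2.1)
        | none => (st.1, st.2.1)
      (st1.1, st1.2 ++ [item], some row)) ([], [], none)
    let blocks := if st.2.1 ≠ [] then st.1 ++ [st.2.1] else st.1
    if blocks.length = 1 then [("BT", blocks.headD []), ("MT", [])]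
    else [("BT", blocks.headD []), ("MT", (blocks.drop 1).headD [])]  -- blocks[0]/blocks[1]; in range since items ≠ []

-- ===== PORT B =====
def rowGetB (r : List (String × Int)) : Option Int := (r.find? (fun p => p.1 == "row")).map (·.2)

-- _first_block: first contiguous block (consecutive sorted rows differ by <= 1) and the remainder
def firstBlock (head : List (String × Int)) (tail : List (List (String × Int))) :
    List (List (String × Int)) × List (List (String × Int)) :=
  match tail with
  | t :: ts =>
    if (rowGetB t).getD 0 - (rowGetB head).getD 0 ≤ 1 then
      let br := firstBlock t ts
      (head :: br.1, br.2)
    else ([head], tail)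
  | [] => ([head], [])

def split_equipos_by_row_py_alt (rows : List (List (String × Int))) : List (String × List (List (String × Int))) :=
  let items := rows.filter (fun r => (rowGetB r).isSome)
  match PySem.List.sorted items (fun x => (rowGetB x).getD 0) false with
  | [] => [("BT", []), ("MT", [])]
  | x :: xs =>
    let br := firstBlock x xs
    let mt := match br.2 with
      | [] => ([] : List (List (String × Int)))
      | y :: ys => (firstBlock y ys).1
    [("BT", br.1), ("MT", mt)]

-- ===== PRECONDITION & SPEC =====
def Spec_split_equipos_by_row_py (rows : List (List (String × Int))) (out : List (String × List (List (String × Int)))) : Prop := out = split_equipos_by_row_py_alt rows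
instance (rows : List (List (String × Int))) (out : List (String × List (List (String × Int)))) : Decidable (Spec_split_equipos_by_row_py rows out) := by unfold Spec_split_equipos_by_row_py; infer_instance

-- ===== CLAIM (what is proved, stated in full; the proofs are below) =====
def Claim_equal_split_equipos_by_row_py : Prop := ∀ (rows : List (List (String × Int))), Dom_split_equipos_by_row_py rows → Spec_split_equipos_by_row_py rows (split_equipos_by_row_py rows)

-- ===== LEMMAS AND PROOFS =====

lemma rowGetAB : rowGetA = rowGetB := rfl

lemma firstBlock_snd_length_le (head : List (String × Int)) (tail : List (List (String × Int))) :
    ((firstBlock head tail).2).length ≤ tail.length := by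
  induction tail generalizing head with
  | nil => simp [firstBlock]
  | cons t ts ih =>
    simp only [firstBlock]
    split
    · exact le_trans (ih t) (by simp)
    · simp

-- the full list of blocks B's peel would produce, used to characterise A's fold
mutual
def blocksAll (head : List (String × Int)) (tail : List (List (String × Int))) :
    List (List (List (String × Int))) :=
  (firstBlock head tail).1 :: restBlocks (firstBlock head tail).2
termination_by 2 * tail.length + 1
decreasing_by
  have := firstBlock_snd_length_le head tail
  omega

def restBlocks : List (List (String × Int)) → List (List (List (String × Int)))
  | [] => []
  | y :: ys => blocksAll y ys
termination_by l => 2 * l.length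
decreasing_by
  simp
  omega
end

lemma blocksAll_eq (head : List (String × Int)) (tail : List (List (String × Int))) :
    blocksAll head tail = (firstBlock head tail).1 :: restBlocks (firstBlock head tail).2 := by
  rw [blocksAll]

-- A's loop step, named so the induction can speak about it (definitionally the port's lambda)
def stepA (st : List (List (List (String × Int))) × List (List (String × Int)) × Option Int)
    (item : List (String × Int)) :
    List (List (List (String × Int))) × List (List (String × Int)) × Option Int :=
  let row := (rowGetA item).getD 0
  let st1 := match st.2.2 with
    | some p => if row - p > 1 then (st.1 ++ [st.2.1], ([] : List (List (String × Int)))) else (st.1, st.2.1)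
    | none => (st.1, st.2.1)
  (st1.1, st1.2 ++ [item], some row)

def pvBlocks (st : List (List (List (String × Int))) × List (List (String × Int)) × Option Int) :
    List (List (List (String × Int))) :=
  if st.2.1 ≠ [] then st.1 ++ [st.2.1] else st.1

def pvEmit (blocks : List (List (List (String × Int)))) : List (String × List (List (String × Int))) :=
  if blocks.length = 1 then [("BT", blocks.headD []), ("MT", [])]
  else [("BT", blocks.headD []), ("MT", (blocks.drop 1).headD [])]

lemma portA_eq (rows : List (List (String × Int))) :
    split_equipos_by_row_py rows =
      (if rows.filter (fun r => (rowGetA r).isSome) = [] then [("BT", []), ("MT", [])]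
       else pvEmit (pvBlocks ((PySem.List.sorted (rows.filter (fun r => (rowGetA r).isSome))
                (fun x => (rowGetA x).getD 0) false).foldl stepA ([], [], none)))) := rfl

lemma portB_cons (rows : List (List (String × Int))) (x : List (String × Int)) (xs : List (List (String × Int)))
    (hx : PySem.List.sorted (rows.filter (fun r => (rowGetA r).isSome)) (fun x => (rowGetA x).getD 0) false = x :: xs) :
    split_equipos_by_row_py_alt rows =
      [("BT", (firstBlock x xs).1),
       ("MT", match (firstBlock x xs).2 with
              | [] => ([] : List (List (String × Int)))
              | y :: ys => (firstBlock y ys).1)] := by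
  unfold split_equipos_by_row_py_alt
  dsimp only
  rw [← rowGetAB, hx]

lemma foldA_blocks :
    ∀ (tail : List (List (String × Int))) (blocksAcc : List (List (List (String × Int))))
      (curAcc : List (List (String × Int))) (head : List (String × Int)),
      pvBlocks (tail.foldl stepA (blocksAcc, curAcc ++ [head], some ((rowGetA head).getD 0)))
      = blocksAcc ++ ((curAcc ++ (firstBlock head tail).1) :: restBlocks (firstBlock head tail).2) := by
  intro tail
  induction tail with
  | nil =>
    intro blocksAcc curAcc head
    simp [pvBlocks, firstBlock, restBlocks]
  | cons t ts ih =>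
    intro blocksAcc curAcc head
    by_cases hle : (rowGetB t).getD 0 - (rowGetB head).getD 0 ≤ 1
    · -- no gap: t joins the current block
      have hstep : stepA (blocksAcc, curAcc ++ [head], some ((rowGetA head).getD 0)) t
          = (blocksAcc, (curAcc ++ [head]) ++ [t], some ((rowGetA t).getD 0)) := by
        rw [rowGetAB] at *
        simp only [stepA, rowGetAB]
        rw [if_neg (by omega)]
      simp only [List.foldl_cons, hstep, ih]
      simp [firstBlock, hle]
    · -- gap: the current block is flushed, a new one starts at t
      have hstep : stepA (blocksAcc, curAcc ++ [head], some ((rowGetA head).getD 0)) t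
          = (blocksAcc ++ [curAcc ++ [head]], [] ++ [t], some ((rowGetA t).getD 0)) := by
        rw [rowGetAB] at *
        simp only [stepA, rowGetAB]
        rw [if_pos (by omega)]
      simp only [List.foldl_cons, hstep]
      rw [ih (blocksAcc ++ [curAcc ++ [head]]) [] t]
      rw [show firstBlock head (t :: ts) = ([head], t :: ts) by simp [firstBlock, hle]]
      rw [show restBlocks (t :: ts) = blocksAll t ts by rw [restBlocks], blocksAll_eq]
      simp

-- ===== VERDICT (by name: the statement is the Claim_ definition above) =====
theorem split_equipos_by_row_py_spec : Claim_equal_split_equipos_by_row_py := by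
  intro rows _
  unfold Spec_split_equipos_by_row_py
  rw [portA_eq]
  by_cases h : rows.filter (fun r => (rowGetA r).isSome) = []
  · rw [if_pos h]
    unfold split_equipos_by_row_py_alt
    dsimp only
    rw [← rowGetAB, h]
    rfl
  · rw [if_neg h]
    have hs : PySem.List.sorted (rows.filter (fun r => (rowGetA r).isSome))
        (fun x => (rowGetA x).getD 0) false ≠ [] :=
      fun hnil => h ((PySem.List.sorted_eq_nil_iff _ _ _).mp hnil)
    obtain ⟨x, xs, hx⟩ := List.exists_cons_of_ne_nil hs
    rw [portB_cons rows x xs hx, hx]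
    simp only [List.foldl_cons]
    rw [show stepA ([], [], none) x = ([], [] ++ [x], some ((rowGetA x).getD 0)) from rfl]
    rw [foldA_blocks xs [] [] x]
    simp only [List.nil_append]
    cases hr : (firstBlock x xs).2 with
    | nil => simp [pvEmit, restBlocks]
    | cons y ys =>
      simp only [restBlocks, pvEmit, blocksAll_eq]
      simp
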